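-- pv_equiv track=rewrite | github.com/knyazevi81/aslan-new-year | app/services/expression.py | _find_top_level_ternary
-- ===== SOURCE A (Python) =====
-- from typing import Any, Dict, Mapping, Optional
--
-- _TERNARY_Q = "?"
--
-- _TERNARY_C = ":"
--
-- def _find_top_level_ternary(expr: str) -> Optional[tuple[int, int]]:
--     """
--     Returns positions of '?' and matching ':' at top level (not inside parentheses or strings).
--     """
--     depth = 0
--     in_str = False
--     q_pos = None
--     nested_q = 0
--     for i, ch in enumerate(expr):
--         if ch == "'" and (i == 0 or expr[i - 1] != "\\"):
--             in_str = not in_str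
--         if in_str:
--             continue
--         if ch == "(":
--             depth += 1
--         elif ch == ")":
--             depth -= 1
--         elif depth == 0:
--             if ch == _TERNARY_Q:
--                 if q_pos is None:
--                     q_pos = i
--                 else:
--                     nested_q += 1
--             elif ch == _TERNARY_C and q_pos is not None:
--                 if nested_q == 0:
--                     return q_pos, i
--                 nested_q -= 1
--     return None
-- ===== SOURCE B (Python) =====
-- def _find_top_level_ternary(expr):
--     # Phase 1: collect top-level '?'/':' tokens (outside single-quoted strings, paren depth 0).
--     toks = []
--     depth = 0
--     in_str = False
--     prev = ""
--     for i, ch in enumerate(expr):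
--         if ch == "'" and prev != "\\":
--             in_str = not in_str
--         if not in_str:
--             if ch == "(":
--                 depth += 1
--             elif ch == ")":
--                 depth -= 1
--             elif depth == 0 and ch in "?:":
--                 toks.append((i, ch))
--         prev = ch
--     # Phase 2: match the first '?' with its ':' using a stack of nested '?' positions.
--     q_pos = None
--     stack = []
--     for i, ch in toks:
--         if ch == "?":
--             if q_pos is None:
--                 q_pos = i
--             else:
--                 stack.append(i)
--         elif q_pos is not None:
--             if not stack:
--                 return q_pos, i
--             stack.pop()
--     return None
-- ===== Notes on version B (the rewrite author's own statement) =====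
-- stated objective: alternative
-- what changed: Replaces A's single fused loop (which interleaves depth/string tracking with ternary matching via an integer nesting counter) by two separate passes: one pass extracts the top-level question-mark and colon tokens with their indices, and a second pass over that token list matches the first question mark to its colon using a stack of nested question-mark positions.
import Mathlib
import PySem

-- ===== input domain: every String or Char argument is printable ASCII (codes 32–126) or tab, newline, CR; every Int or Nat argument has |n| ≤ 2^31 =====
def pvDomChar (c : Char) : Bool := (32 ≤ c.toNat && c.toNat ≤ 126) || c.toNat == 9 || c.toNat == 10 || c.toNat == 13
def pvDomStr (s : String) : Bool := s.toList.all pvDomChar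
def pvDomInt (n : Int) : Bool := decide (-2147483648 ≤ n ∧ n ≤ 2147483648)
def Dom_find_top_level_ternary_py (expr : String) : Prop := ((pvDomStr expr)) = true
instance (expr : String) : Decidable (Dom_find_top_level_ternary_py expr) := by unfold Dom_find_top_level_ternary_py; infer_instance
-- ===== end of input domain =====

-- ===== PORT A =====
-- B restructures A's fused loop into two passes (token extraction, then stack-based matching); return value unchanged.
-- Port of A: structural recursion over the characters carrying (index, previous char, depth, in_str, q_pos, nested_q).
def findGoA : List Char → Int → Option Char → Int → Bool → Option Int → Int → Option (Int × Int)
  | [], _, _, _, _, _, _ => none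
  | ch :: rest, i, prev, depth, instr, qpos, nested =>
    let instr' := if ch = '\'' ∧ prev ≠ some '\\' then !instr else instr
    if instr' then findGoA rest (i+1) (some ch) depth instr' qpos nested
    else if ch = '(' then findGoA rest (i+1) (some ch) (depth+1) instr' qpos nested
    else if ch = ')' then findGoA rest (i+1) (some ch) (depth-1) instr' qpos nested
    else if depth = 0 then
      if ch = '?' then
        match qpos with
        | none => findGoA rest (i+1) (some ch) depth instr' (some i) nested
        | some _ => findGoA rest (i+1) (some ch) depth instr' qpos (nested+1)
      else if ch = ':' then
        match qpos with
        | some q => if nested = 0 then some (q, i) else findGoA rest (i+1) (some ch) depth instr' qpos (nested-1)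
        | none => findGoA rest (i+1) (some ch) depth instr' qpos nested
      else findGoA rest (i+1) (some ch) depth instr' qpos nested
    else findGoA rest (i+1) (some ch) depth instr' qpos nested

def find_top_level_ternary_py (expr : String) : Option (Int × Int) :=
  findGoA expr.toList 0 none 0 false none 0

-- ===== PORT B =====
-- Phase 1 of B: extract the top-level '?'/':' tokens as (index, char) pairs.
def findToksB : List Char → Int → Option Char → Int → Bool → List (Int × Char)
  | [], _, _, _, _ => []
  | ch :: rest, i, prev, depth, instr =>
    let instr' := if ch = '\'' ∧ prev ≠ some '\\' then !instr else instr
    if instr' then findToksB rest (i+1) (some ch) depth instr'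
    else if ch = '(' then findToksB rest (i+1) (some ch) (depth+1) instr'
    else if ch = ')' then findToksB rest (i+1) (some ch) (depth-1) instr'
    else if depth = 0 ∧ (ch = '?' ∨ ch = ':') then (i, ch) :: findToksB rest (i+1) (some ch) depth instr'
    else findToksB rest (i+1) (some ch) depth instr'

-- Phase 2 of B: match the first '?' with its ':' using a stack of nested '?' positions.
def findMatchB : List (Int × Char) → Option Int → List Int → Option (Int × Int)
  | [], _, _ => none
  | (i, ch) :: rest, none, stack =>
    if ch = '?' then findMatchB rest (some i) stack
    else findMatchB rest none stack
  | (i, ch) :: rest, some q, stack =>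
    if ch = '?' then findMatchB rest (some q) (i :: stack)
    else
      match stack with
      | [] => some (q, i)
      | _ :: s => findMatchB rest (some q) s

def find_top_level_ternary_py_alt (expr : String) : Option (Int × Int) :=
  findMatchB (findToksB expr.toList 0 none 0 false) none []
-- ===== PRECONDITION & SPEC =====
def Spec_find_top_level_ternary_py (expr : String) (out : Option (Int × Int)) : Prop := out = find_top_level_ternary_py_alt expr
instance (expr : String) (out : Option (Int × Int)) : Decidable (Spec_find_top_level_ternary_py expr out) := by unfold Spec_find_top_level_ternary_py; infer_instance

-- ===== CLAIM (what is proved, stated in full; the proofs are below) =====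
def Claim_equal_find_top_level_ternary_py : Prop := ∀ (expr : String), Dom_find_top_level_ternary_py expr → Spec_find_top_level_ternary_py expr (find_top_level_ternary_py expr)

-- ===== LEMMAS AND PROOFS =====

-- ===== VERDICT (by name: the statement is the Claim_ definition above) =====
-- Main invariant: A's fused loop equals B's phase-2 run over B's phase-1 tokens,
-- with A's nesting counter equal to the length of B's stack.
theorem findGo_eq_match (cs : List Char) : ∀ (i : Int) (prev : Option Char) (depth : Int)
    (instr : Bool) (qpos : Option Int) (stack : List Int),
    findGoA cs i prev depth instr qpos (stack.length : Int)
      = findMatchB (findToksB cs i prev depth instr) qpos stack := by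
  induction cs with
  | nil =>
    intro i prev depth instr qpos stack
    cases qpos <;> simp [findGoA, findToksB, findMatchB]
  | cons ch rest ih =>
    intro i prev depth instr qpos stack
    simp only [findGoA, findToksB]
    cases hb : (if ch = '\'' ∧ prev ≠ some '\\' then !instr else instr) with
    | true =>
      exact ih ..
    | false =>
      simp only [if_neg (show ¬(false = true) by simp)]
      by_cases hp : ch = '('
      · simp only [if_pos hp]; exact ih ..
      simp only [if_neg hp]
      by_cases hcl : ch = ')'
      · simp only [if_pos hcl]; exact ih ..
      simp only [if_neg hcl]
      by_cases hd : depth = 0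
      · simp only [if_pos hd]
        by_cases hQ : ch = '?'
        · subst hQ
          cases qpos with
          | none =>
            simpa [findMatchB, hd] using ih (i+1) (some '?') depth false (some i) stack
          | some q =>
            simpa [findMatchB, hd] using ih (i+1) (some '?') depth false (some q) (i :: stack)
        · simp only [if_neg hQ]
          by_cases hC : ch = ':'
          · subst hC
            cases qpos with
            | none =>
              simpa [findMatchB, hd] using ih (i+1) (some ':') depth false none stack
            | some q =>
              cases stack with
              | nil => simp [findMatchB, hd]
              | cons a s =>
                have hne : ¬ ((s.length : Int) + 1 = 0) := by omega
                simpa [findMatchB, hd, hne] using ih (i+1) (some ':') depth false (some q) s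
          · simp only [if_neg hC, if_neg (show ¬(depth = 0 ∧ (ch = '?' ∨ ch = ':')) from
              fun h => h.2.elim hQ hC)]
            exact ih ..
      · simp only [if_neg hd, if_neg (show ¬(depth = 0 ∧ (ch = '?' ∨ ch = ':')) from fun h => hd h.1)]
        exact ih ..

theorem find_top_level_ternary_py_spec : Claim_equal_find_top_level_ternary_py := by
  intro expr _
  unfold Spec_find_top_level_ternary_py find_top_level_ternary_py find_top_level_ternary_py_alt
  simpa using findGo_eq_match expr.toList 0 none 0 false none []
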